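-- pv_equiv track=rewrite | github.com/akikuno/DAJIN2 | src/DAJIN2/utils/midsv_handler.py | _combine_midsvs_by_prefix
-- ===== SOURCE A (Python) =====
-- def _combine_midsvs_by_prefix(midsv_tags: list[str]) -> list[str]:
--     if not midsv_tags:
--         return []
--
--     combined_midsv_tags = []
--     prev_prefix: str = midsv_tags[0][0]
--     current_cs: list[str] = [midsv_tags[0][1:]]
--
--     for item in midsv_tags[1:]:
--         current_prefix, cs = item[0], item[1:]
--         if prev_prefix == current_prefix:
--             if current_prefix == "*":
--                 current_cs.append(item)
--             else:
--                 current_cs.append(cs)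
--         else:
--             combined_midsv_tags.append(prev_prefix + "".join(current_cs))
--             prev_prefix = current_prefix
--             current_cs = [cs]
--
--     combined_midsv_tags.append(prev_prefix + "".join(current_cs))
--     return combined_midsv_tags
-- ===== SOURCE B (Python) =====
-- def _combine_midsvs_by_prefix(midsv_tags: list[str]) -> list[str]:
--     out = []
--     i, n = 0, len(midsv_tags)
--     while i < n:
--         prefix = midsv_tags[i][0]
--         j = i + 1
--         while j < n and midsv_tags[j][0] == prefix:
--             j += 1
--         parts = [midsv_tags[i][1:]]
--         for item in midsv_tags[i + 1 : j]:
--             parts.append(item if prefix == "*" else item[1:])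
--         out.append(prefix + "".join(parts))
--         i = j
--     return out
-- ===== Notes on version B (the rewrite author's own statement) =====
-- stated objective: alternative
-- what changed: B finds each maximal same-prefix run up front with an inner boundary scan and emits its combined string directly, instead of A's single pass carrying prev_prefix/current_cs accumulator state with a flush on prefix change.
import Mathlib
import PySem

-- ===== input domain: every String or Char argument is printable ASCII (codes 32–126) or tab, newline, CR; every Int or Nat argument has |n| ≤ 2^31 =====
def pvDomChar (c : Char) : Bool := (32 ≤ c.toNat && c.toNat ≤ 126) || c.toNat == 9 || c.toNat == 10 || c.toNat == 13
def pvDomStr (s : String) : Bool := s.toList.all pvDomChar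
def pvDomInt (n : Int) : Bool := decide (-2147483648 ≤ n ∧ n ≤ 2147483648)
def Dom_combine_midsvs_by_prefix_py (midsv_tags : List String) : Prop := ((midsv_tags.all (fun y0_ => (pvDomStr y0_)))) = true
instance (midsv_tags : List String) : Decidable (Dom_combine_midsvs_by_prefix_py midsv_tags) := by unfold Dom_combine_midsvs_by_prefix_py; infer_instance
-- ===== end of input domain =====

-- B replaces A's accumulator-with-flush single pass by explicit maximal-run detection
-- (scan the run boundary, then emit the combined string per run): an alternative
-- decomposition of the same O(total-length) task; return values agree on Pre_.


-- ===== PORT A =====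
-- s[0]: faithful on Pre_ (every string nonempty; Python raises IndexError on "")
def pvHeadC (s : String) : Char := s.toList.headD ' '
-- s[1:]
def pvTail (s : String) : List Char := s.toList.tail

-- the for-loop of A, carrying (combined_midsv_tags, prev_prefix, current_cs);
-- current_cs is kept as the list of appended chunks ("".join = flatten at emit time)
def pvALoop : List String → List String → Char → List (List Char) → List String
  | [], acc, pp, cs => acc ++ [String.mk (pp :: cs.flatten)]
  | item :: rest, acc, pp, cs =>
    let cp := pvHeadC item
    if pp = cp then
      if cp = '*' then pvALoop rest acc pp (cs ++ [item.toList])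
      else pvALoop rest acc pp (cs ++ [pvTail item])
    else pvALoop rest (acc ++ [String.mk (pp :: cs.flatten)]) cp [pvTail item]

def combine_midsvs_by_prefix_py (midsv_tags : List String) : List String :=
  match midsv_tags with
  | [] => []
  | x :: rest => pvALoop rest [] (pvHeadC x) [pvTail x]

-- ===== PORT B =====
-- contribution of a non-first element of a run (full item if prefix '*', else item[1:])
def pvContrib (p : Char) (s : String) : List Char := if p = '*' then s.toList else pvTail s

-- outer while-loop of B: take the maximal run of the head's prefix, emit, recurse on the rest
def pvBGo (xs : List String) : List String :=
  match xs with
  | [] => []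
  | x :: rest =>
    let p := pvHeadC x
    let run := rest.takeWhile (fun s => pvHeadC s == p)
    let rest' := rest.dropWhile (fun s => pvHeadC s == p)
    String.mk (p :: (pvTail x ++ run.flatMap (pvContrib p))) :: pvBGo rest'
termination_by xs.length
decreasing_by
  simp only [List.length_cons]
  exact Nat.lt_succ_of_le (List.length_dropWhile_le _ _)

def combine_midsvs_by_prefix_py_alt (midsv_tags : List String) : List String :=
  pvBGo midsv_tags

-- ===== PRECONDITION & SPEC =====
-- Pre_ excludes lists containing an empty string: there Python A (and B) raise IndexError on item[0].
def Pre_combine_midsvs_by_prefix_py (midsv_tags : List String) : Prop :=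
  ∀ s ∈ midsv_tags, s ≠ ""
instance (midsv_tags : List String) : Decidable (Pre_combine_midsvs_by_prefix_py midsv_tags) := by unfold Pre_combine_midsvs_by_prefix_py; infer_instance

def pvWitness_combine_midsvs_by_prefix_py : List String := ["=A", "=B", "*ab", "*cd", "-x"]

def Spec_combine_midsvs_by_prefix_py (midsv_tags : List String) (out : List String) : Prop := out = combine_midsvs_by_prefix_py_alt midsv_tags
instance (midsv_tags : List String) (out : List String) : Decidable (Spec_combine_midsvs_by_prefix_py midsv_tags out) := by unfold Spec_combine_midsvs_by_prefix_py; infer_instance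

-- ===== CLAIM (what is proved, stated in full; the proofs are below) =====
def Claim_equal_combine_midsvs_by_prefix_py : Prop := ∀ (midsv_tags : List String), Dom_combine_midsvs_by_prefix_py midsv_tags → Pre_combine_midsvs_by_prefix_py midsv_tags → Spec_combine_midsvs_by_prefix_py midsv_tags (combine_midsvs_by_prefix_py midsv_tags)

-- ===== LEMMAS AND PROOFS =====
-- A's loop from an arbitrary state equals: finish the current run (takeWhile), then B on the rest.
lemma pvALoop_eq (xs : List String) : ∀ (acc : List String) (pp : Char) (cs : List (List Char)),
    pvALoop xs acc pp cs =
      acc ++ (String.mk (pp :: (cs.flatten ++ (xs.takeWhile (fun s => pvHeadC s == pp)).flatMap (pvContrib pp)))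
        :: pvBGo (xs.dropWhile (fun s => pvHeadC s == pp))) := by
  induction xs with
  | nil => intro acc pp cs; simp [pvALoop, pvBGo]
  | cons x rest ih =>
    intro acc pp cs
    by_cases h : pp = pvHeadC x
    · subst h
      simp only [pvALoop]
      by_cases hs : pvHeadC x = '*'
      · rw [if_pos hs, ih]
        simp [pvContrib, hs]
      · rw [if_neg hs, ih]
        simp [pvContrib, hs]
    · have h' : (pvHeadC x == pp) = false := beq_eq_false_iff_ne.mpr (fun hh => h hh.symm)
      simp only [pvALoop, if_neg h, List.takeWhile_cons, List.dropWhile_cons, h', if_false,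
        Bool.false_eq_true]
      rw [ih]
      rw [pvBGo]
      simp

theorem combine_midsvs_by_prefix_py_spec_aux (midsv_tags : List String) :
    combine_midsvs_by_prefix_py midsv_tags = combine_midsvs_by_prefix_py_alt midsv_tags := by
  cases midsv_tags with
  | nil =>
    show ([] : List String) = pvBGo []
    rw [pvBGo]
  | cons x rest =>
    show pvALoop rest [] (pvHeadC x) [pvTail x] = pvBGo (x :: rest)
    rw [pvALoop_eq, pvBGo]
    simp

-- ===== VERDICT (by name: the statement is the Claim_ definition above) =====
theorem combine_midsvs_by_prefix_py_spec : Claim_equal_combine_midsvs_by_prefix_py := by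
  intro xs _ _
  exact combine_midsvs_by_prefix_py_spec_aux xs
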